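-- pv_equiv track=rewrite | github.com/sola-st/CodeMapper | src/anything_tracker/utils/TransferRanges.py | transfer_2_indices_to_4
-- ===== SOURCE A (Python) =====
-- def transfer_2_indices_to_4(given_start_character_idx, given_end_character_idx, source_lines_len_list):
--     '''
--     Web UI connection specific.
--     Transfer the location range for picked up source regions.
--     # 2: absolute character indices | [start, end]
--     # 4: line and character indices | [start_line, start_char., end_line, end_char]
--     '''
--
--     # To return
--     start_line_idx = None
--     end_line_idx= None
--     start_character_idx = None
--     end_character_idx = None
--
--     pre_location = 0
--     current_location = 0
--
--     for line_idx, length in enumerate(source_lines_len_list):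
--         current_location +=length
--         current_location_border = current_location + 1
--         if given_start_character_idx in range(pre_location, current_location_border) and start_line_idx == None:
--             start_line_idx = line_idx + 1
--             start_character_idx = given_start_character_idx - pre_location
--         if given_end_character_idx in range(pre_location, current_location_border) and end_line_idx == None:
--             end_line_idx = line_idx + 1
--             end_character_idx = given_end_character_idx - pre_location
--
--         if start_line_idx and end_line_idx:
--             region_range = [start_line_idx, start_character_idx, end_line_idx, end_character_idx]
--             return region_range
--
--         pre_location = current_location
-- ===== SOURCE B (Python) =====
-- def transfer_2_indices_to_4(given_start_character_idx, given_end_character_idx, source_lines_len_list):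
--     # Prefix table of cumulative line-end positions; each index is located
--     # independently by a first-match scan over adjacent prefix pairs.
--     prefix = [0]
--     for length in source_lines_len_list:
--         prefix.append(prefix[-1] + length)
--
--     def locate(idx):
--         for line in range(len(source_lines_len_list)):
--             if prefix[line] <= idx <= prefix[line + 1]:
--                 return line + 1, idx - prefix[line]
--         return None
--
--     start = locate(given_start_character_idx)
--     end = locate(given_end_character_idx)
--     if start is None or end is None:
--         return None
--     return [start[0], start[1], end[0], end[1]]
-- ===== Notes on version B (the rewrite author's own statement) =====
-- stated objective: simpler
-- what changed: Replaces A's single fused loop with four mutable Option slots and an early return by a precomputed prefix table of cumulative line ends plus two independent first-match lookups (one per index).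
import Mathlib
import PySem

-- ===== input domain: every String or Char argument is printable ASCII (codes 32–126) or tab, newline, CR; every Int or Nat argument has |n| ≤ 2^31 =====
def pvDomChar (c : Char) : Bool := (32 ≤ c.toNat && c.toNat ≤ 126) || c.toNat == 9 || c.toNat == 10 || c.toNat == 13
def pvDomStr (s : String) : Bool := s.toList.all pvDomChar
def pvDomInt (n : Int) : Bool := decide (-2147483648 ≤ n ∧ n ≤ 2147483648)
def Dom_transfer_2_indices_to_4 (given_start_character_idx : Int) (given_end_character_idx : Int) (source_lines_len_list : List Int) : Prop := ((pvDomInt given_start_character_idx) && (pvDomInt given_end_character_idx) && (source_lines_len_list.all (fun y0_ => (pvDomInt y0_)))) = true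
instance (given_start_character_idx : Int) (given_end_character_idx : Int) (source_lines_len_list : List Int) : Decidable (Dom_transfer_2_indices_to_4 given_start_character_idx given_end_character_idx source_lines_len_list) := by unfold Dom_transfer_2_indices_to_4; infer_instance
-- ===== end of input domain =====

-- B replaces A's single fused accumulate-and-test loop (four mutable Option
-- slots, early return) by a prefix table plus two independent first-match
-- lookups; objective: simpler. Return value equivalence is exact and total.

-- ===== PORT A =====
-- State: line index, pre_location, and the four Option slots of A's loop.
-- `sc`/`ec` are always some whenever `sl`/`el` are (they are set together);
-- `getD 0` in the return is therefore never the default.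
def pvALoop (s e : Int) : List Int → Nat → Int →
    Option Int → Option Int → Option Int → Option Int → Option (List Int)
  | [], _, _, _, _, _, _ => none
  | L :: rest, li, pre, sl, sc, el, ec =>
    let cur := pre + L
    let sl' := if (pre ≤ s ∧ s < cur + 1) ∧ sl = none then some ((li : Int) + 1) else sl
    let sc' := if (pre ≤ s ∧ s < cur + 1) ∧ sl = none then some (s - pre) else sc
    let el' := if (pre ≤ e ∧ e < cur + 1) ∧ el = none then some ((li : Int) + 1) else el
    let ec' := if (pre ≤ e ∧ e < cur + 1) ∧ el = none then some (e - pre) else ec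
    match sl', el' with
    | some a, some b =>
      -- Python truthiness `if start_line_idx and end_line_idx`
      if a ≠ 0 ∧ b ≠ 0 then some [a, sc'.getD 0, b, ec'.getD 0]
      else pvALoop s e rest (li + 1) cur sl' sc' el' ec'
    | _, _ => pvALoop s e rest (li + 1) cur sl' sc' el' ec'

def transfer_2_indices_to_4 (given_start_character_idx : Int) (given_end_character_idx : Int) (source_lines_len_list : List Int) : Option (List Int) :=
  pvALoop given_start_character_idx given_end_character_idx source_lines_len_list 0 0 none none none none

-- ===== PORT B =====
-- cumulative sums after the leading 0 (Python's `prefix[1:]`)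
def pvBuildPrefix : List Int → Int → List Int
  | [], _ => []
  | L :: rest, acc => (acc + L) :: pvBuildPrefix rest (acc + L)

-- first line whose inclusive prefix pair contains idx
def pvLocate (idx : Int) : List Int → Nat → Option (Int × Int)
  | p :: q :: rest, line =>
    if p ≤ idx ∧ idx ≤ q then some ((line : Int) + 1, idx - p)
    else pvLocate idx (q :: rest) (line + 1)
  | _, _ => none

def transfer_2_indices_to_4_alt (given_start_character_idx : Int) (given_end_character_idx : Int) (source_lines_len_list : List Int) : Option (List Int) :=
  let pfx := 0 :: pvBuildPrefix source_lines_len_list 0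
  match pvLocate given_start_character_idx pfx 0, pvLocate given_end_character_idx pfx 0 with
  | some st, some en => some [st.1, st.2, en.1, en.2]
  | _, _ => none

-- ===== PRECONDITION & SPEC =====
def Spec_transfer_2_indices_to_4 (given_start_character_idx : Int) (given_end_character_idx : Int) (source_lines_len_list : List Int) (out : Option (List Int)) : Prop := out = transfer_2_indices_to_4_alt given_start_character_idx given_end_character_idx source_lines_len_list
instance (given_start_character_idx : Int) (given_end_character_idx : Int) (source_lines_len_list : List Int) (out : Option (List Int)) : Decidable (Spec_transfer_2_indices_to_4 given_start_character_idx given_end_character_idx source_lines_len_list out) := by unfold Spec_transfer_2_indices_to_4; infer_instance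

-- ===== CLAIM (what is proved, stated in full; the proofs are below) =====
def Claim_equal_transfer_2_indices_to_4 : Prop := ∀ (given_start_character_idx : Int) (given_end_character_idx : Int) (source_lines_len_list : List Int), Dom_transfer_2_indices_to_4 given_start_character_idx given_end_character_idx source_lines_len_list → Spec_transfer_2_indices_to_4 given_start_character_idx given_end_character_idx source_lines_len_list (transfer_2_indices_to_4 given_start_character_idx given_end_character_idx source_lines_len_list)

-- ===== LEMMAS AND PROOFS =====

-- pvLocate unfolding helpers
theorem pvLocate_pos (idx p q : Int) (rest : List Int) (line : Nat)
    (h : p ≤ idx ∧ idx ≤ q) :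
    pvLocate idx (p :: q :: rest) line = some ((line : Int) + 1, idx - p) := by
  simp [pvLocate, h]

theorem pvLocate_neg (idx p q : Int) (rest : List Int) (line : Nat)
    (h : ¬ (p ≤ idx ∧ idx ≤ q)) :
    pvLocate idx (p :: q :: rest) line = pvLocate idx (q :: rest) (line + 1) := by
  simp [pvLocate, h]

-- Invariant lemma: A's loop, started in a state where at most one of the two
-- slots is filled (and any filled line index is >= 1 with its character slot
-- set), computes the two independent lookups of B's locate on the remaining
-- prefix list.
theorem pvALoop_eq (s e : Int) (lens : List Int) : ∀ (li : Nat) (pre : Int)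
    (sl sc el ec : Option Int),
    (∀ a, sl = some a → 1 ≤ a ∧ ∃ c, sc = some c) →
    (∀ b, el = some b → 1 ≤ b ∧ ∃ d, ec = some d) →
    (sl = none ∨ el = none) →
    pvALoop s e lens li pre sl sc el ec =
      (match (match sl with
              | some a => some (a, sc.getD 0)
              | none => pvLocate s (pre :: pvBuildPrefix lens pre) li),
             (match el with
              | some b => some (b, ec.getD 0)
              | none => pvLocate e (pre :: pvBuildPrefix lens pre) li) with
       | some st, some en => some [st.1, st.2, en.1, en.2]
       | _, _ => none) := by
  induction lens with
  | nil =>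
    intro li pre sl sc el ec hs he hne
    simp only [pvALoop, pvBuildPrefix, pvLocate]
    rcases hne with h | h
    · subst h; cases el <;> simp
    · subst h; cases sl <;> simp
  | cons L rest ih =>
    intro li pre sl sc el ec hs he hne
    simp only [pvALoop, pvBuildPrefix]
    split_ifs with h1 h2 h2
    · -- both indices land on this line
      obtain ⟨hPs, hsl⟩ := h1; obtain ⟨hPe, hel⟩ := h2; subst hsl; subst hel
      rw [pvLocate_pos s pre (pre + L) _ li ⟨hPs.1, by omega⟩,
          pvLocate_pos e pre (pre + L) _ li ⟨hPe.1, by omega⟩]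
      have hli : ((li : Int) + 1) ≠ 0 := by omega
      simp [hli]
    · -- start lands here, end does not
      obtain ⟨hPs, hsl⟩ := h1; subst hsl
      rw [pvLocate_pos s pre (pre + L) _ li ⟨hPs.1, by omega⟩]
      cases el with
      | some b =>
        obtain ⟨hb, d, hd⟩ := he b rfl; subst hd
        have hli : ((li : Int) + 1) ≠ 0 := by omega
        have hbne : b ≠ 0 := by omega
        simp [hli, hbne]
      | none =>
        have hQ : ¬ (pre ≤ e ∧ e ≤ pre + L) := fun q => h2 ⟨⟨q.1, by omega⟩, rfl⟩
        rw [pvLocate_neg e pre (pre + L) _ li hQ]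
        rw [ih (li + 1) (pre + L) (some ((li : Int) + 1)) (some (s - pre)) none ec
            (by rintro a ⟨rfl⟩; exact ⟨by omega, _, rfl⟩)
            (by rintro b h; cases h) (Or.inr rfl)]
        simp
    · -- end lands here, start does not
      obtain ⟨hPe, hel⟩ := h2; subst hel
      rw [pvLocate_pos e pre (pre + L) _ li ⟨hPe.1, by omega⟩]
      cases sl with
      | some a =>
        obtain ⟨ha, c, hc⟩ := hs a rfl; subst hc
        have hli : ((li : Int) + 1) ≠ 0 := by omega
        have hane : a ≠ 0 := by omega
        simp [hli, hane]
      | none =>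
        have hP : ¬ (pre ≤ s ∧ s ≤ pre + L) := fun q => h1 ⟨⟨q.1, by omega⟩, rfl⟩
        rw [pvLocate_neg s pre (pre + L) _ li hP]
        rw [ih (li + 1) (pre + L) none sc (some ((li : Int) + 1)) (some (e - pre))
            (by rintro a h; cases h)
            (by rintro b ⟨rfl⟩; exact ⟨by omega, _, rfl⟩) (Or.inl rfl)]
        simp
    · -- neither index lands on this line
      cases sl with
      | some a =>
        rcases hne with h | hel
        · cases h
        · subst hel
          obtain ⟨ha, c, hc⟩ := hs a rfl; subst hc
          have hQ : ¬ (pre ≤ e ∧ e ≤ pre + L) := fun q => h2 ⟨⟨q.1, by omega⟩, rfl⟩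
          rw [pvLocate_neg e pre (pre + L) _ li hQ]
          rw [ih (li + 1) (pre + L) (some a) (some c) none ec
              (by rintro a' ⟨rfl⟩; exact ⟨ha, _, rfl⟩)
              (by rintro b h; cases h) (Or.inr rfl)]
      | none =>
        have hP : ¬ (pre ≤ s ∧ s ≤ pre + L) := fun q => h1 ⟨⟨q.1, by omega⟩, rfl⟩
        rw [pvLocate_neg s pre (pre + L) _ li hP]
        cases el with
        | some b =>
          obtain ⟨hb, d, hd⟩ := he b rfl; subst hd
          rw [ih (li + 1) (pre + L) none sc (some b) (some d)
              (by rintro a h; cases h)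
              (by rintro b' ⟨rfl⟩; exact ⟨hb, _, rfl⟩) (Or.inl rfl)]
        | none =>
          have hQ : ¬ (pre ≤ e ∧ e ≤ pre + L) := fun q => h2 ⟨⟨q.1, by omega⟩, rfl⟩
          rw [pvLocate_neg e pre (pre + L) _ li hQ]
          rw [ih (li + 1) (pre + L) none sc none ec
              (by rintro a h; cases h) (by rintro b h; cases h) (Or.inl rfl)]

-- ===== VERDICT (by name: the statement is the Claim_ definition above) =====
theorem transfer_2_indices_to_4_spec : Claim_equal_transfer_2_indices_to_4 := by
  intro s e lens _
  unfold Spec_transfer_2_indices_to_4 transfer_2_indices_to_4 transfer_2_indices_to_4_alt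
  rw [pvALoop_eq s e lens 0 0 none none none none (by simp) (by simp) (Or.inl rfl)]
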